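-- pv_equiv track=rewrite | github.com/ding05/intro_to_python | 110119PA.py | valid_ints
-- ===== SOURCE A (Python) =====
-- def valid_ints(strings):
--     integers = []
--     for string in strings:
--         try:
--             integer = int(string)
--             if integer not in integers:
--                 integers.append(integer)
--         except ValueError:
--             pass
--     return integers
-- ===== SOURCE B (Python) =====
-- def valid_ints(strings):
--     # Build the answer back-to-front: walk the input in reverse; each parsed
--     # value goes to the front and evicts its (later-occurring) duplicate from
--     # the partial result, so first occurrences win without any membership test.
--     result = []
--     for string in reversed(strings):
--         try:
--             value = int(string)
--         except ValueError:
--             continue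
--         result = [value] + [x for x in result if x != value]
--     return result
-- ===== Notes on version B (the rewrite author's own statement) =====
-- stated objective: alternative
-- what changed: Replaces A's forward loop with an inner 'not in' membership scan by a backward traversal that prepends each parsed value and filters its later duplicate out of the partial result, so dedup happens by removal instead of a membership test.
import Mathlib
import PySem

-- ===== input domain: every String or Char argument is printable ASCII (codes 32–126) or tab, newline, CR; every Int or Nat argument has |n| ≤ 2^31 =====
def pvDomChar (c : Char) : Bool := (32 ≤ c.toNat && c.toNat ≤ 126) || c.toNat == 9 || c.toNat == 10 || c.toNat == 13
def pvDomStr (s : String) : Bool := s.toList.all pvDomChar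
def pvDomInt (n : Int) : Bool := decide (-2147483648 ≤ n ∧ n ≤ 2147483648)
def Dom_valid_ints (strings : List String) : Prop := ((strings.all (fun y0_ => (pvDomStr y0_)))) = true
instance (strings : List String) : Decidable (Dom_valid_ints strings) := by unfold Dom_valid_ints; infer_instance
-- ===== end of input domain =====

-- B walks the input backwards and deduplicates by removing the later duplicate from the partial
-- result instead of testing membership before appending; same return value, a different traversal.

-- ===== PORT A =====
-- forward loop: parse, append only if not already collected
def valid_ints (strings : List String) : List Int :=
  strings.foldl (fun integers string =>
    match PySem.Int.ofStr? string with
    | some integer => if integer ∈ integers then integers else integers ++ [integer]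
    | none => integers) []

-- ===== PORT B =====
-- loop over reversed(strings): prepend the parsed value, filter it out of the old partial result
def valid_ints_alt (strings : List String) : List Int :=
  strings.reverse.foldl (fun result string =>
    match PySem.Int.ofStr? string with
    | some value => value :: result.filter (fun x => x ≠ value)
    | none => result) []

-- ===== PRECONDITION & SPEC =====
def Spec_valid_ints (strings : List String) (out : List Int) : Prop := out = valid_ints_alt strings
instance (strings : List String) (out : List Int) : Decidable (Spec_valid_ints strings out) := by unfold Spec_valid_ints; infer_instance

-- ===== CLAIM (what is proved, stated in full; the proofs are below) =====
def Claim_equal_valid_ints : Prop := ∀ (strings : List String), Dom_valid_ints strings → Spec_valid_ints strings (valid_ints strings)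

-- ===== LEMMAS AND PROOFS =====

-- A's step/B's step on the already-parsed integers
def pvAddA (acc : List Int) (v : Int) : List Int := if v ∈ acc then acc else acc ++ [v]
def pvStepB (v : Int) (res : List Int) : List Int := v :: res.filter (fun x => x ≠ v)

-- A's fold over strings = fold of pvAddA over the parseable integers
theorem valid_ints_eq_foldl (strings : List String) (acc : List Int) :
    strings.foldl (fun integers string =>
      match PySem.Int.ofStr? string with
      | some integer => if integer ∈ integers then integers else integers ++ [integer]
      | none => integers) acc
    = (strings.filterMap PySem.Int.ofStr?).foldl pvAddA acc := by
  induction strings generalizing acc with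
  | nil => rfl
  | cons s rest ih =>
    simp only [List.foldl_cons, List.filterMap_cons]
    cases h : PySem.Int.ofStr? s with
    | none => exact ih acc
    | some v => simpa [pvAddA] using ih (pvAddA acc v)

-- B's fold over reversed strings = right fold of pvStepB over the parseable integers
theorem valid_ints_alt_eq_foldr (strings : List String) :
    valid_ints_alt strings
    = (strings.filterMap PySem.Int.ofStr?).foldr pvStepB [] := by
  unfold valid_ints_alt
  rw [List.foldl_reverse]
  induction strings with
  | nil => rfl
  | cons s rest ih =>
    simp only [List.foldr_cons, List.filterMap_cons]
    cases h : PySem.Int.ofStr? s with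
    | none => exact ih
    | some v => exact congrArg (pvStepB v) ih

-- the bridge: left "append if new" fold from acc = acc ++ (right remove-dup fold), minus acc's elements
theorem foldl_addA_eq_foldr_stepB (xs : List Int) (acc : List Int) :
    xs.foldl pvAddA acc = acc ++ (xs.foldr pvStepB []).filter (fun x => x ∉ acc) := by
  induction xs generalizing acc with
  | nil => simp
  | cons v xs ih =>
    simp only [List.foldl_cons, List.foldr_cons, pvStepB]
    by_cases hv : v ∈ acc
    · have : pvAddA acc v = acc := by simp [pvAddA, hv]
      rw [this, ih]
      congr 1
      simp only [List.filter_cons, decide_not]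
      rw [if_neg (by simp [hv])]
      rw [List.filter_filter]
      apply List.filter_congr
      intro x _
      by_cases hx : x ∈ acc
      · simp [hx]
      · have : x ≠ v := fun he => hx (he ▸ hv)
        simp [hx, this]
    · have : pvAddA acc v = acc ++ [v] := by simp [pvAddA, hv]
      rw [this, ih]
      simp only [List.append_assoc, List.singleton_append]
      congr 1
      simp only [List.filter_cons, decide_not]
      rw [if_pos (by simp [hv])]
      congr 1
      rw [List.filter_filter]
      apply List.filter_congr
      intro x _
      by_cases hx : x ∈ acc
      · simp [hx]
      · simp [hx, List.mem_append]

-- ===== VERDICT (by name: the statement is the Claim_ definition above) =====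
theorem valid_ints_spec : Claim_equal_valid_ints := by
  intro strings _
  show valid_ints strings = valid_ints_alt strings
  unfold valid_ints
  rw [valid_ints_eq_foldl, valid_ints_alt_eq_foldr, foldl_addA_eq_foldr_stepB]
  simp
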